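-- pv_equiv track=rewrite | github.com/AGPAllStar/AdvanceWarsMapGenerator | kerasUtil.py | getMapFromString
-- ===== SOURCE A (Python) =====
-- def getMapFromString(mapString):
--     mapArray = []
--     mapRow = []
--     for c in mapString:
--         if(c == '\n'):
--             mapArray.append(mapRow)
--             mapRow = []
--         else:
--             mapRow.append(c)
--     return mapArray
-- ===== SOURCE B (Python) =====
-- def getMapFromString(mapString):
--     return [list(row) for row in mapString.split('\n')[:-1]]
-- ===== Notes on version B (the rewrite author's own statement) =====
-- stated objective: simpler
-- what changed: Replaces the per-character loop with a mutable row accumulator by a single library split on the newline separator, dropping the unterminated final piece with a [:-1] slice and listing each line's characters.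
import Mathlib
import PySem

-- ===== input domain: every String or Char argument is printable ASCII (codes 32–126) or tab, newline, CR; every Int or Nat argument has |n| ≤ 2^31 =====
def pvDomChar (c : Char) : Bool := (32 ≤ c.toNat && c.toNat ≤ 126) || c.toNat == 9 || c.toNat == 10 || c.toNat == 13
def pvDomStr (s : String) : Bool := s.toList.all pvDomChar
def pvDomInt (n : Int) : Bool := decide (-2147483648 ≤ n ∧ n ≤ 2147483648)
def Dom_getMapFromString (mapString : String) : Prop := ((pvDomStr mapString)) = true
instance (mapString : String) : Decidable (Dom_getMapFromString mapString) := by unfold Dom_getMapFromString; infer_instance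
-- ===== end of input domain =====

-- B splits the string into lines with one library split on the newline separator and drops the unterminated
-- final piece ([:-1]) instead of A's per-character loop with a mutable row accumulator (simpler).

-- ===== PORT A =====
-- A: fold over the characters carrying (mapArray, mapRow); on '\n' flush the row, else append the char.
def getMapFromString (mapString : String) : List (List String) :=
  (mapString.toList.foldl
    (fun (s : List (List String) × List String) (c : Char) =>
      if c = '\n' then (s.1 ++ [s.2], [])
      else (s.1, s.2 ++ [String.ofList [c]]))
    ([], [])).1

-- ===== PORT B =====
-- B: mapString.split('\n')[:-1], each line turned into its list of 1-char strings.
def getMapFromString_alt (mapString : String) : List (List String) :=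
  -- .getD [] is unreachable: the separator "\n" is non-empty, so split? returns some
  (PySem.List.slice ((PySem.Str.split? mapString "\n").getD []) none (some (-1))).map
    (fun row => row.toList.map (fun c => String.ofList [c]))

-- ===== PRECONDITION & SPEC =====
def Spec_getMapFromString (mapString : String) (out : List (List String)) : Prop := out = getMapFromString_alt mapString
instance (mapString : String) (out : List (List String)) : Decidable (Spec_getMapFromString mapString out) := by unfold Spec_getMapFromString; infer_instance

-- ===== CLAIM (what is proved, stated in full; the proofs are below) =====
def Claim_equal_getMapFromString : Prop := ∀ (mapString : String), Dom_getMapFromString mapString → Spec_getMapFromString mapString (getMapFromString mapString)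

-- ===== LEMMAS AND PROOFS =====

-- reference splitter: pvSplit row cs = the '\n'-separated pieces of row ++ cs
def pvSplit (row : List Char) (cs : List Char) : List (List Char) :=
  match cs with
  | [] => [row]
  | c :: rest => if c = '\n' then row :: pvSplit [] rest else pvSplit (row ++ [c]) rest

theorem pvSplit_ne_nil (row cs : List Char) : pvSplit row cs ≠ [] := by
  induction cs generalizing row with
  | nil => simp [pvSplit]
  | cons c rest ih => simp only [pvSplit]; split_ifs <;> simp [ih]

def pvRowMap (r : List Char) : List String := r.map (fun c => String.ofList [c])

theorem foldA_spec (cs : List Char) : ∀ (arr : List (List String)) (rc : List Char),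
    (cs.foldl
      (fun (s : List (List String) × List String) (c : Char) =>
        if c = '\n' then (s.1 ++ [s.2], [])
        else (s.1, s.2 ++ [String.ofList [c]]))
      (arr, pvRowMap rc)).1
    = arr ++ (pvSplit rc cs).dropLast.map pvRowMap := by
  induction cs with
  | nil => intro arr rc; simp [pvSplit]
  | cons c rest ih =>
    intro arr rc
    by_cases hc : c = '\n'
    · subst hc
      simp only [List.foldl_cons, if_true]
      have h3 := ih (arr ++ [pvRowMap rc]) []
      simp only [show pvRowMap ([] : List Char) = [] from rfl] at h3
      rw [h3]
      have h2 := pvSplit_ne_nil ([] : List Char) rest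
      simp [pvSplit, List.dropLast_cons_of_ne_nil h2]
    · have h1 : pvRowMap rc ++ [String.ofList [c]] = pvRowMap (rc ++ [c]) := by
        simp [pvRowMap]
      simp only [List.foldl_cons, if_neg hc]
      rw [h1, ih arr (rc ++ [c])]
      simp [pvSplit, hc]

theorem go_spec (fuel : Nat) : ∀ (cs cur : List Char) (acc : List (List Char)),
    cs.length < fuel →
    PySem.Chars.splitOn.go ['\n'] fuel cs cur acc = acc.reverse ++ pvSplit cur.reverse cs := by
  induction fuel with
  | zero => intro cs cur acc h; omega
  | succ f ih =>
    intro cs cur acc h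
    match cs with
    | [] => simp [PySem.Chars.splitOn.go, pvSplit]
    | c :: rest =>
      by_cases hc : c = '\n'
      · have hp : (['\n'] : List Char).isPrefixOf (c :: rest) = true := by
          simp [List.isPrefixOf, hc]
        subst hc
        rw [PySem.Chars.splitOn.go]
        simp only [hp, if_true]
        rw [show List.drop (['\n'] : List Char).length ('\n' :: rest) = rest from rfl]
        rw [ih rest [] (cur.reverse :: acc) (by simpa using Nat.lt_of_succ_lt_succ h)]
        simp [pvSplit]
      · have hp : (['\n'] : List Char).isPrefixOf (c :: rest) = false := by
          simp [List.isPrefixOf]; exact fun h => absurd h.symm hc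
        rw [PySem.Chars.splitOn.go]
        simp only [hp, Bool.false_eq_true, if_false]
        rw [ih rest (c :: cur) acc (by simpa using Nat.lt_of_succ_lt_succ h)]
        simp [pvSplit, hc]

theorem splitOn_eq (cs : List Char) : PySem.Chars.splitOn cs ['\n'] = pvSplit [] cs := by
  rw [PySem.Chars.splitOn, go_spec (cs.length + 1) cs [] [] (by omega)]
  simp

-- ===== VERDICT (by name: the statement is the Claim_ definition above) =====
theorem getMapFromString_spec : Claim_equal_getMapFromString := by
  intro s _
  unfold Spec_getMapFromString getMapFromString getMapFromString_alt
  have h := foldA_spec s.toList [] []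
  rw [show pvRowMap ([] : List Char) = [] from rfl] at h
  rw [h]
  have hsplit : PySem.Str.split? s "\n" = some ((pvSplit [] s.toList).map String.ofList) := by
    rw [PySem.Str.split?, PySem.Chars.split?]
    rw [show ("\n" : String).toList = ['\n'] from rfl]
    simp [splitOn_eq]
  rw [hsplit, Option.getD_some, PySem.List.slice_to_neg_one, ← List.map_dropLast]
  simp only [List.nil_append, List.map_map, Function.comp_def]
  exact List.map_congr_left (fun r _ => by simp [pvRowMap])
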